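-- pv_equiv track=rewrite | github.com/mlister-scottlogic/aoc-25 | src/2025/day3.py | joltage1
-- ===== SOURCE A (Python) =====
-- from typing import List
--
-- def joltage1(batteries: List[int]):
--     if len(batteries) == 2:
--         return (batteries[0], batteries[1])
--
--     current_best = joltage1(batteries[1:])
--     if batteries[0] >= current_best[0]:
--         if current_best[0] > current_best[1]:
--             return (batteries[0], current_best[0])
--         else:
--             return (batteries[0], current_best[1])
--
--     return current_best
-- ===== SOURCE B (Python) =====
-- from typing import List
--
-- def joltage1(batteries: List[int]):
--     # O(n): scan right-to-left keeping the current best pair, no slicing/recursion.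
--     a, b = batteries[-2], batteries[-1]
--     for x in reversed(batteries[:-2]):
--         if x >= a:
--             a, b = x, (a if a > b else b)
--     return (a, b)
-- ===== Notes on version B (the rewrite author's own statement) =====
-- stated objective: faster
-- what changed: replaces the recursion-with-slicing by a single right-to-left iterative scan maintaining the best pair
import Mathlib
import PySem

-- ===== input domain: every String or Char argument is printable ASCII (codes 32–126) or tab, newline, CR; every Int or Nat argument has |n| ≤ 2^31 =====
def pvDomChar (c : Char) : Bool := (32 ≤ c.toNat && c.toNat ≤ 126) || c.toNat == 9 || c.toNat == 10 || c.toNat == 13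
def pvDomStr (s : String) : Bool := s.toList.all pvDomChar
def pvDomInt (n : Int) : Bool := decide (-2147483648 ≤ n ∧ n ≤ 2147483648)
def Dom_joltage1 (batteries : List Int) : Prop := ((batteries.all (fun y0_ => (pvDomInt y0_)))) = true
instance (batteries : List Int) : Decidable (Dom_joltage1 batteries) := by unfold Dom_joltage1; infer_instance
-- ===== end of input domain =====

-- B replaces A's recursion-with-slicing by one right-to-left iterative scan (O(n) vs O(n^2)).


-- ===== PORT A =====
-- Python diverges (RecursionError) on lists of length < 2; those inputs are excluded by Pre_,
-- the [] / [x] branches here are unreachable placeholders.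
def joltage1 : List Int → Int × Int
  | [] => (0, 0)
  | [_] => (0, 0)
  | [a, b] => (a, b)
  | x :: rest@(_ :: _ :: _) =>
    let current_best := joltage1 rest   -- batteries[1:]
    if x ≥ current_best.1 then
      if current_best.1 > current_best.2 then (x, current_best.1)
      else (x, current_best.2)
    else current_best

-- ===== PORT B =====
-- loop body: state (a, b), element x
def altStep (s : Int × Int) (x : Int) : Int × Int :=
  if x ≥ s.1 then (x, if s.1 > s.2 then s.1 else s.2) else s

-- Source B: a,b = batteries[-2], batteries[-1]; for x in reversed(batteries[:-2]): …
-- batteries.reverse = b :: a :: rest, and rest = reversed(batteries[:-2]).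
def joltage1_alt (batteries : List Int) : Int × Int :=
  match batteries.reverse with
  | b :: a :: rest => rest.foldl altStep (a, b)
  | _ => (0, 0)   -- len < 2: Python raises IndexError; excluded by Pre_

-- ===== PRECONDITION & SPEC =====
-- A raises (RecursionError) on lists with fewer than 2 elements; B raises IndexError there too.
def Pre_joltage1 (batteries : List Int) : Prop := 2 ≤ batteries.length
instance (batteries : List Int) : Decidable (Pre_joltage1 batteries) := by unfold Pre_joltage1; infer_instance
def pvWitness_joltage1 : List Int := [3, 1, 4, 1, 5]

def Spec_joltage1 (batteries : List Int) (out : Int × Int) : Prop := out = joltage1_alt batteries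
instance (batteries : List Int) (out : Int × Int) : Decidable (Spec_joltage1 batteries out) := by unfold Spec_joltage1; infer_instance

-- ===== CLAIM (what is proved, stated in full; the proofs are below) =====
def Claim_equal_joltage1 : Prop := ∀ (batteries : List Int), Dom_joltage1 batteries → Pre_joltage1 batteries → Spec_joltage1 batteries (joltage1 batteries)

-- ===== LEMMAS AND PROOFS =====

-- peeling one element off the front of a list of length ≥ 2 is one more altStep
lemma alt_cons (x : Int) (rest : List Int) (h : 2 ≤ rest.length) :
    joltage1_alt (x :: rest) = altStep (joltage1_alt rest) x := by
  match hr : rest.reverse with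
  | [] => simp at hr; simp [hr] at h
  | [b] => have := congrArg List.length hr; simp at this; omega
  | b :: a :: r =>
    have hxr : (x :: rest).reverse = b :: a :: (r ++ [x]) := by
      simp [List.reverse_cons, hr]
    simp [joltage1_alt, hxr, hr, List.foldl_append]

lemma main_lemma : ∀ (l : List Int), 2 ≤ l.length → joltage1 l = joltage1_alt l := by
  intro l
  induction l with
  | nil => simp
  | cons x rest ih =>
    intro h
    match rest with
    | [] => simp at h
    | [b] => simp [joltage1, joltage1_alt]
    | a :: b :: t =>
      have h2 : 2 ≤ (a :: b :: t).length := by simp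
      rw [alt_cons x _ h2, ← ih h2]
      simp only [joltage1, altStep]
      split_ifs <;> simp_all

-- ===== VERDICT (by name: the statement is the Claim_ definition above) =====
theorem joltage1_spec : Claim_equal_joltage1 := by
  intro l _ hp
  unfold Spec_joltage1
  exact main_lemma l hp
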